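-- pv_equiv track=rewrite | github.com/gilianhonkoop/OpenSourceSensei | sensei/buffer_loader_scripts/utils.py | distance_to_previous_ones
-- ===== SOURCE A (Python) =====
-- def distance_to_previous_ones(is_first):
--     distances = []
--     last_one_index = None  # We start with no '1' found
--
--     for i, value in enumerate(is_first):
--         if value == 1 or last_one_index is None:
--             last_one_index = i  # Update the last index of '1'
--             distances.append(0)  # Distance to itself is zero
--         else:
--             distances.append(i - last_one_index)  # Compute the distance
--
--     return distances
-- ===== SOURCE B (Python) =====
-- def distance_to_previous_ones(is_first):
--     # Phase 1: collect reset boundaries (index 0 always resets; any later 1 resets).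
--     resets = [0]
--     for i, v in enumerate(is_first):
--         if i > 0 and v == 1:
--             resets.append(i)
--     # Phase 2: lay down one arithmetic run 0,1,2,... per segment.
--     ends = resets[1:] + [len(is_first)]
--     out = []
--     for p, q in zip(resets, ends):
--         out.extend(range(q - p))
--     return out
-- ===== Notes on version B (the rewrite author's own statement) =====
-- stated objective: alternative
-- what changed: Replaces the running last_one_index-and-subtract scan by a two-phase algorithm: first collect the reset boundaries (index 0 plus every later index holding a 1), then emit the range 0..len-1 for each segment between consecutive boundaries.
import Mathlib
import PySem

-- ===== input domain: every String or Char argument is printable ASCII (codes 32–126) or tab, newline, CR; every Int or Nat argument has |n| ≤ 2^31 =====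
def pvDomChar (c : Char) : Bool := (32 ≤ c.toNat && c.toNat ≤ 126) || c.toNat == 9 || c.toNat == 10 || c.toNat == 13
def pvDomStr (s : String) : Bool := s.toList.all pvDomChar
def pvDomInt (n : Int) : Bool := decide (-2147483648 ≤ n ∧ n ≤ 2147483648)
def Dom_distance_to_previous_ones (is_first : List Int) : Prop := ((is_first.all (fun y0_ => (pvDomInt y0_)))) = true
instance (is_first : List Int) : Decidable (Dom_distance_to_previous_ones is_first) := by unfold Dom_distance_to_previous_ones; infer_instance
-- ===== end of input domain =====

-- B replaces A's running last_one_index scan by a two-phase boundaries-then-ranges algorithm (same cost, different structure).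


-- ===== PORT A =====
-- the loop 'for i, value in enumerate(...)' is ported as a fold carrying the state
-- (i, distances, last_one_index); st.1 = i, st.2.1 = distances, st.2.2 = last_one_index
def distance_to_previous_ones (is_first : List Int) : List Int :=
  (is_first.foldl
    (fun (st : Int × List Int × Option Int) value =>
      if value = 1 ∨ st.2.2 = none then
        (st.1 + 1, st.2.1 ++ [(0 : Int)], some st.1)
      else
        (st.1 + 1, st.2.1 ++ [st.1 - st.2.2.getD 0], st.2.2))
    (0, [], none)).2.1

-- ===== PORT B =====
def distance_to_previous_ones_alt (is_first : List Int) : List Int :=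
  -- phase 1: resets = [0]; for i, v in enumerate: if i > 0 and v == 1: resets.append(i)
  let resets : List Int :=
    (is_first.foldl
      (fun (st : Int × List Int) v =>
        (st.1 + 1, if 0 < st.1 ∧ v = 1 then st.2 ++ [st.1] else st.2))
      (0, [(0 : Int)])).2
  -- phase 2: ends = resets[1:] + [len]; for p, q in zip(resets, ends): out.extend(range(q - p))
  let ends : List Int := resets.drop 1 ++ [(is_first.length : Int)]
  (resets.zip ends).foldl (fun out pq => out ++ PySem.List.pyRange 0 (pq.2 - pq.1) 1) []

-- ===== PRECONDITION & SPEC =====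
def Spec_distance_to_previous_ones (is_first : List Int) (out : List Int) : Prop := out = distance_to_previous_ones_alt is_first
instance (is_first : List Int) (out : List Int) : Decidable (Spec_distance_to_previous_ones is_first out) := by unfold Spec_distance_to_previous_ones; infer_instance

-- ===== CLAIM (what is proved, stated in full; the proofs are below) =====
def Claim_equal_distance_to_previous_ones : Prop := ∀ (is_first : List Int), Dom_distance_to_previous_ones is_first → Spec_distance_to_previous_ones is_first (distance_to_previous_ones is_first)

-- ===== LEMMAS AND PROOFS =====

-- common specification: distances with current gap counter k
def pvDist : Int → List Int → List Int
  | _, [] => []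
  | k, v :: r => if v = 1 then 0 :: pvDist 1 r else k :: pvDist (k + 1) r

-- absolute indices (from i) of the 1-entries of a list
def pvOnes : Int → List Int → List Int
  | _, [] => []
  | i, v :: r => if v = 1 then i :: pvOnes (i + 1) r else pvOnes (i + 1) r

-- output of phase 2 from boundary p, remaining boundaries, end n
def pvEmit (p : Int) : List Int → Int → List Int
  | [], n => PySem.List.pyRange 0 (n - p) 1
  | q :: rest, n => PySem.List.pyRange 0 (q - p) 1 ++ pvEmit q rest n

theorem pvA_loop (r : List Int) : ∀ (i j : Int) (ds : List Int),
    (r.foldl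
      (fun (st : Int × List Int × Option Int) value =>
        if value = 1 ∨ st.2.2 = none then
          (st.1 + 1, st.2.1 ++ [(0 : Int)], some st.1)
        else
          (st.1 + 1, st.2.1 ++ [st.1 - st.2.2.getD 0], st.2.2))
      (i, ds, some j)).2.1 = ds ++ pvDist (i - j) r := by
  induction r with
  | nil => intro i j ds; simp [pvDist]
  | cons v r ih =>
    intro i j ds
    by_cases hv : v = 1
    · simp [hv, pvDist, List.foldl_cons, ih (i + 1) i (ds ++ [0])]
    · have h1 : (i + 1) - j = (i - j) + 1 := by ring
      simp [hv, pvDist, List.foldl_cons, ih (i + 1) j (ds ++ [i - j]), h1]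

theorem pvB_resets (r : List Int) : ∀ (i : Int) (rs : List Int), 1 ≤ i →
    (r.foldl
      (fun (st : Int × List Int) v =>
        (st.1 + 1, if 0 < st.1 ∧ v = 1 then st.2 ++ [st.1] else st.2))
      (i, rs)).2 = rs ++ pvOnes i r := by
  induction r with
  | nil => intro i rs _; simp [pvOnes]
  | cons v r ih =>
    intro i rs hi
    by_cases hv : v = 1
    · have hpos : 0 < i := by omega
      simp [hv, hpos, pvOnes, List.foldl_cons, ih (i + 1) (rs ++ [i]) (by omega)]
    · simp [hv, pvOnes, List.foldl_cons, ih (i + 1) rs (by omega)]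

theorem pvB_zip (rest : List Int) : ∀ (p n : Int) (acc : List Int),
    (((p :: rest).zip ((p :: rest).drop 1 ++ [n])).foldl
      (fun out pq => out ++ PySem.List.pyRange 0 (pq.2 - pq.1) 1) acc)
      = acc ++ pvEmit p rest n := by
  induction rest with
  | nil => intro p n acc; simp [pvEmit]
  | cons q rest ih =>
    intro p n acc
    have hih := ih q n (acc ++ PySem.List.pyRange 0 (q - p) 1)
    simp only [List.drop_one, List.tail_cons] at hih ⊢
    rw [List.cons_append, List.zip_cons_cons, List.foldl_cons, pvEmit, hih, List.append_assoc]

theorem pvRng_succ (k : Int) (hk : 0 ≤ k) :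
    PySem.List.pyRange 0 (k + 1) 1 = PySem.List.pyRange 0 k 1 ++ [k] := by
  simpa using PySem.List.pyRange_one_succ_right (a := 0) (b := k) hk

theorem pvEmit_ones (r : List Int) : ∀ (i p : Int), p ≤ i →
    pvEmit p (pvOnes i r) (i + r.length) =
      PySem.List.pyRange 0 (i - p) 1 ++ pvDist (i - p) r := by
  induction r with
  | nil => intro i p _; simp [pvOnes, pvEmit, pvDist]
  | cons v r ih =>
    intro i p hpi
    have hlen : (i : Int) + ((v :: r).length : Int) = (i + 1) + (r.length : Int) := by
      simp only [List.length_cons]; push_cast; omega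
    by_cases hv : v = 1
    · rw [show pvOnes i (v :: r) = i :: pvOnes (i + 1) r from by simp [pvOnes, hv]]
      rw [show pvDist (i - p) (v :: r) = 0 :: pvDist 1 r from by simp [pvDist, hv]]
      rw [pvEmit, hlen, ih (i + 1) i (by omega)]
      rw [show (i : Int) + 1 - i = 1 from by ring]
      rw [show PySem.List.pyRange 0 1 1 = [(0 : Int)] from by decide]
      simp
    · rw [show pvOnes i (v :: r) = pvOnes (i + 1) r from by simp [pvOnes, hv]]
      rw [show pvDist (i - p) (v :: r) = (i - p) :: pvDist (i - p + 1) r from by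
        simp [pvDist, hv]]
      rw [hlen, ih (i + 1) p (by omega)]
      rw [show (i : Int) + 1 - p = (i - p) + 1 from by ring]
      rw [pvRng_succ (i - p) (by omega)]
      simp

-- ===== VERDICT (by name: the statement is the Claim_ definition above) =====
theorem distance_to_previous_ones_spec : Claim_equal_distance_to_previous_ones := by
  intro is_first _
  unfold Spec_distance_to_previous_ones distance_to_previous_ones distance_to_previous_ones_alt
  cases is_first with
  | nil => simp [PySem.List.pyRange]
  | cons v r =>
    simp only [List.foldl_cons]
    rw [show (if v = 1 ∨ True then
          ((0 : Int) + 1, ([] : List Int) ++ [(0 : Int)], some (0 : Int))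
        else ((0 : Int) + 1, ([] : List Int) ++ [(0 : Int) - (none : Option Int).getD 0],
          (none : Option Int))) = (1, [0], some 0) from by simp]
    rw [show ((0 : Int) + 1, if (0 : Int) < 0 ∧ v = 1 then [(0 : Int)] ++ [(0 : Int)]
        else [(0 : Int)]) = ((1 : Int), [(0 : Int)]) from by simp]
    rw [pvA_loop r 1 0 [0], pvB_resets r 1 [0] (by omega)]
    simp only [List.singleton_append]
    rw [pvB_zip (pvOnes 1 r) 0 ((v :: r).length : Int) []]
    rw [show (((v :: r).length : Int)) = 1 + (r.length : Int) from by simp only [List.length_cons]; push_cast; omega]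
    rw [pvEmit_ones r 1 0 (by omega)]
    rw [show PySem.List.pyRange 0 (1 - 0) 1 = [(0 : Int)] from by decide]
    simp
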